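-- pv_equiv track=rewrite | github.com/hanss314/TLOW | S0/R5/0.py | tlow5
-- ===== SOURCE A (Python) =====
-- def avocadoCheck(avocados, testAvocado): return testAvocado%256 not in avocados and testAvocado >= 0
--
-- def tlow5(avocados, spoon_size):
--     if not avocados: return 0
--     elif spoon_size < 0: return 256
--     else:
--         factors = [ x for x in range(avocados[::-1][0]-1,1,-1) if avocados[::-1][0]%x == 0 ]
--         if factors and avocadoCheck(avocados, factors[0]): return 0
--         elif avocadoCheck(avocados, avocados[::-1][0]**2): return 1
--         elif avocadoCheck(avocados, avocados[::-1][0]-spoon_size): return 2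
--         else: return 3
-- ===== SOURCE B (Python) =====
-- def avocadoCheck(avocados, testAvocado): return testAvocado%256 not in avocados and testAvocado >= 0
--
-- def tlow5(avocados, spoon_size):
--     if not avocados: return 0
--     if spoon_size < 0: return 256
--     n = avocados[-1]
--     d = None                      # largest proper divisor of n (in [2, n-1]), if any
--     i = 2
--     while i * i <= n:             # trial division up to sqrt(n)
--         if n % i == 0:
--             d = n // i
--             break
--         i += 1
--     if d is not None and avocadoCheck(avocados, d):
--         return 0
--     if avocadoCheck(avocados, n * n):
--         return 1
--     if avocadoCheck(avocados, n - spoon_size):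
--         return 2
--     return 3
-- ===== Notes on version B (the rewrite author's own statement) =====
-- stated objective: faster
-- what changed: A enumerates every candidate divisor of the last element from n-1 down to 2 and takes the head of that list; B trial-divides only up to sqrt(n) to find the smallest factor p and computes the largest proper divisor as n//p directly.
import Mathlib
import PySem

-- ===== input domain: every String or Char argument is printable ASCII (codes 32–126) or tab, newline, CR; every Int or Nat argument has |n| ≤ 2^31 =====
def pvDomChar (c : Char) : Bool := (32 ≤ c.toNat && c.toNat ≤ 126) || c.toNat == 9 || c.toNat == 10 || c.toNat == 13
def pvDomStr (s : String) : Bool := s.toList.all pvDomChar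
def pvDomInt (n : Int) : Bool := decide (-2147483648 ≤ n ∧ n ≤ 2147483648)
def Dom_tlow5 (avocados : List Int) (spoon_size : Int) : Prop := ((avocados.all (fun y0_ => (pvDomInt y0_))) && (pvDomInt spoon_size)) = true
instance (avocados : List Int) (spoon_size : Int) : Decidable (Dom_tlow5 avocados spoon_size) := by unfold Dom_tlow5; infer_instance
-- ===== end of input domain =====

-- B replaces A's scan over every divisor candidate of the last element (from n-1 down to 2)
-- by trial division up to sqrt(n): largest proper divisor = n // smallest factor (faster, asymptotic).

-- ===== PORT A =====
def avocadoCheckA (avocados : List Int) (testAvocado : Int) : Bool :=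
  !(avocados.contains (PySem.Int.mod testAvocado 256)) && decide (0 ≤ testAvocado)

def tlow5 (avocados : List Int) (spoon_size : Int) : Int :=
  if avocados.isEmpty then 0
  else if spoon_size < 0 then 256
  else
    -- avocados[::-1][0]: guarded by the emptiness branch, so pyGet? is some and getD 0 is never hit
    let n : Int := (PySem.List.pyGet? ((PySem.List.slice? avocados none none (-1)).getD []) 0).getD 0
    let factors := (PySem.List.pyRange (n - 1) 1 (-1)).filter (fun x => PySem.Int.mod n x == 0)
    if (match factors with
        | f :: _ => avocadoCheckA avocados f
        | [] => false) then 0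
    else if avocadoCheckA avocados (n ^ 2) then 1
    else if avocadoCheckA avocados (n - spoon_size) then 2
    else 3

-- ===== PORT B =====
def avocadoCheckB (avocados : List Int) (testAvocado : Int) : Bool :=
  !(avocados.contains (PySem.Int.mod testAvocado 256)) && decide (0 ≤ testAvocado)

-- B's while loop: first i (from the start value) with i*i ≤ n and n % i == 0 gives d = n // i; else None
def largestDivLoop (n i : Int) : Option Int :=
  if _h : i * i ≤ n then
    if PySem.Int.mod n i == 0 then some (PySem.Int.floordiv n i)
    else largestDivLoop n (i + 1)
  else none
termination_by (n + 1 - i).toNat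
decreasing_by
  have hi : i ≤ n := by nlinarith [mul_self_nonneg (i - 1)]
  omega

def tlow5_alt (avocados : List Int) (spoon_size : Int) : Int :=
  if avocados.isEmpty then 0
  else if spoon_size < 0 then 256
  else
    -- avocados[-1]: guarded by the emptiness branch, so pyGet? is some and getD 0 is never hit
    let n : Int := (PySem.List.pyGet? avocados (-1)).getD 0
    let d := largestDivLoop n 2
    if (match d with
        | some d0 => avocadoCheckB avocados d0
        | none => false) then 0
    else if avocadoCheckB avocados (n * n) then 1
    else if avocadoCheckB avocados (n - spoon_size) then 2
    else 3

-- ===== PRECONDITION & SPEC =====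
def Spec_tlow5 (avocados : List Int) (spoon_size : Int) (out : Int) : Prop := out = tlow5_alt avocados spoon_size
instance (avocados : List Int) (spoon_size : Int) (out : Int) : Decidable (Spec_tlow5 avocados spoon_size out) := by unfold Spec_tlow5; infer_instance

-- ===== CLAIM (what is proved, stated in full; the proofs are below) =====
def Claim_equal_tlow5 : Prop := ∀ (avocados : List Int) (spoon_size : Int), Dom_tlow5 avocados spoon_size → Spec_tlow5 avocados spoon_size (tlow5 avocados spoon_size)

-- ===== LEMMAS AND PROOFS =====

-- trial-division loop, "found" side: the result comes from the smallest divisor p ≥ i (with p*p ≤ n)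
lemma loop_some_spec (n i d : Int) (h : largestDivLoop n i = some d) :
    ∃ p, i ≤ p ∧ p * p ≤ n ∧ p ∣ n ∧ (∀ q, i ≤ q → q < p → ¬ q ∣ n) ∧
      d = PySem.Int.floordiv n p := by
  fun_induction largestDivLoop n i with
  | case1 i hle hmod =>
    refine ⟨i, le_rfl, hle, ?_, fun q hq1 hq2 => absurd hq1 (by omega), ?_⟩
    · exact (PySem.Int.mod_eq_zero_iff_dvd n i).mp (by simpa using hmod)
    · simpa using h.symm
  | case2 i hle hmod ih =>
    obtain ⟨p, hp1, hp2, hp3, hp4, hp5⟩ := ih h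
    refine ⟨p, by omega, hp2, hp3, fun q hq1 hq2 => ?_, hp5⟩
    rcases eq_or_lt_of_le hq1 with rfl | hlt
    · simp only [beq_iff_eq] at hmod
      exact fun hd => hmod ((PySem.Int.mod_eq_zero_iff_dvd n i).mpr hd)
    · exact hp4 q (by omega) hq2
  | case3 i hle => simp at h

-- trial-division loop, "none" side: no divisor q ≥ i with q*q ≤ n
lemma loop_none_spec (n i : Int) (hi : 0 ≤ i) (h : largestDivLoop n i = none) :
    ∀ q, i ≤ q → q * q ≤ n → ¬ q ∣ n := by
  fun_induction largestDivLoop n i with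
  | case1 i hle hmod => simp at h
  | case2 i hle hmod ih =>
    intro q hq1 hq2
    rcases eq_or_lt_of_le hq1 with rfl | hlt
    · simp only [beq_iff_eq] at hmod
      exact fun hd => hmod ((PySem.Int.mod_eq_zero_iff_dvd n i).mpr hd)
    · exact ih (by omega) h q (by omega) hq2
  | case3 i hle =>
    intro q hq1 hq2 hd
    have : i * i ≤ q * q := by nlinarith
    omega

-- filtering a descending range gives [] when no x in (1,a] satisfies P
lemma desc_filter_nil (a : Int) (P : Int → Bool)
    (h : ∀ x, 1 < x → x ≤ a → P x = false) :
    (PySem.List.pyRange a 1 (-1)).filter P = [] := by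
  refine List.filter_eq_nil_iff.mpr (fun x hx => ?_)
  have hm := (PySem.List.mem_pyRange_neg_one).mp hx
  simp [h x hm.1 hm.2]

-- head of the filtered descending range is the LARGEST x in (1,a] with P x
lemma desc_filter_head (a m : Int) (P : Int → Bool)
    (h1 : 1 < m) (h2 : m ≤ a) (hP : P m = true)
    (hmax : ∀ x, m < x → x ≤ a → P x = false) :
    ((PySem.List.pyRange a 1 (-1)).filter P).head? = some m := by
  have key : ∀ k : ℕ, ∀ a : Int, (a - m).toNat = k → m ≤ a →
      (∀ x, m < x → x ≤ a → P x = false) →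
      ((PySem.List.pyRange a 1 (-1)).filter P).head? = some m := by
    intro k
    induction k with
    | zero =>
      intro a hk ha _
      have : a = m := by omega
      subst this
      rw [PySem.List.pyRange_neg_one_cons (by omega : (1:Int) < a)]
      simp [hP]
    | succ k ih =>
      intro a hk ha hmx
      have hma : m < a := by omega
      rw [PySem.List.pyRange_neg_one_cons (by omega : (1:Int) < a)]
      rw [List.filter_cons, if_neg (by simp [hmx a hma le_rfl])]
      exact ih (a - 1) (by omega) (by omega) (fun x hx1 hx2 => hmx x hx1 (by omega))
  exact key (a - m).toNat a rfl h2 hmax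

-- the core equality: A's "first divisor from the top" = B's trial-division result
lemma head_eq_loop (n : Int) :
    ((PySem.List.pyRange (n - 1) 1 (-1)).filter (fun x => PySem.Int.mod n x == 0)).head?
      = largestDivLoop n 2 := by
  cases h : largestDivLoop n 2 with
  | none =>
    rw [desc_filter_nil]
    · rfl
    · intro x hx1 hxa
      simp only [beq_eq_false_iff_ne, ne_eq, PySem.Int.mod_eq_zero_iff_dvd]
      intro hd
      obtain ⟨y, hy⟩ := hd
      have hn3 : 3 ≤ n := by omega
      have hy1 : 1 ≤ y := by nlinarith
      have hy2 : 2 ≤ y := by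
        rcases eq_or_lt_of_le hy1 with rfl | _
        · rw [mul_one] at hy; omega
        · omega
      have hyd : y ∣ n := ⟨x, by rw [hy, mul_comm]⟩
      rcases le_or_gt (x * x) n with hxx | hxx
      · exact loop_none_spec n 2 (by omega) h x (by omega) hxx ⟨y, hy⟩
      · have hyx : y < x := by nlinarith
        have : y * y ≤ n := by nlinarith
        exact loop_none_spec n 2 (by omega) h y (by omega) this hyd
  | some d =>
    obtain ⟨p, hp1, hp2, hp3, hp4, rfl⟩ := loop_some_spec n 2 d h
    obtain ⟨c, hc⟩ := hp3
    have hpc : p ≤ c := by nlinarith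
    have hc2 : 2 ≤ c := by omega
    have hn4 : 4 ≤ n := by nlinarith
    have hcn : c ≤ n - 1 := by nlinarith
    have hfld : PySem.Int.floordiv n p = c := by
      rw [PySem.Int.floordiv_eq_ediv_of_pos (by omega)]
      rw [hc]
      exact Int.mul_ediv_cancel_left c (by omega)
    rw [hfld]
    apply desc_filter_head
    · omega
    · omega
    · simp only [beq_iff_eq, PySem.Int.mod_eq_zero_iff_dvd]
      exact ⟨p, by rw [hc, mul_comm]⟩
    · intro x hx1 hx2
      simp only [beq_eq_false_iff_ne, ne_eq, PySem.Int.mod_eq_zero_iff_dvd]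
      intro hd
      obtain ⟨y, hy⟩ := hd
      have hy1 : 1 ≤ y := by nlinarith
      have hy2 : 2 ≤ y := by
        rcases eq_or_lt_of_le hy1 with rfl | _
        · rw [mul_one] at hy; omega
        · omega
      have hyd : y ∣ n := ⟨x, by rw [hy, mul_comm]⟩
      have hyp : p ≤ y := by
        by_contra hlt
        exact hp4 y (by omega) (by omega) hyd
      nlinarith

-- the two last-element expressions agree on nonempty lists
lemma last_eq (avocados : List Int) (h : avocados ≠ []) :
    (PySem.List.pyGet? ((PySem.List.slice? avocados none none (-1)).getD []) 0).getD 0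
      = (PySem.List.pyGet? avocados (-1)).getD 0 := by
  rw [PySem.List.slice?_none_none_neg_one]
  obtain ⟨x, xs, rfl⟩ := List.exists_cons_of_ne_nil h
  simp [PySem.List.pyGet?, PySem.List.pyIdx?]
  rcases xs with _ | ⟨y, ys⟩
  · simp
  · rw [List.getElem_append_left (by simp), List.getElem_reverse]
    simp

-- ===== VERDICT (by name: the statement is the Claim_ definition above) =====
theorem tlow5_spec : Claim_equal_tlow5 := by
  intro avocados spoon_size _
  unfold Spec_tlow5 tlow5 tlow5_alt avocadoCheckA avocadoCheckB
  rcases eq_or_ne avocados.isEmpty true with hb | hb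
  · rw [if_pos hb, if_pos hb]
  · rw [if_neg hb, if_neg hb]
    by_cases hs : spoon_size < 0
    · rw [if_pos hs, if_pos hs]
    · rw [if_neg hs, if_neg hs]
      have hne : avocados ≠ [] := fun hnil => hb (by simp [hnil])
      simp only [last_eq avocados hne, pow_two]
      set n := (PySem.List.pyGet? avocados (-1)).getD 0 with hn
      have hguard := head_eq_loop n
      cases hld : largestDivLoop n 2 with
      | none =>
        rw [hld] at hguard
        rw [List.head?_eq_none_iff.mp hguard]
      | some d =>
        rw [hld] at hguard
        obtain ⟨t, ht⟩ := List.head?_eq_some_iff.mp hguard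
        rw [ht]
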